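-- pv_equiv track=rewrite | github.com/quinnbrighton/sailing-elo | datacollector2.py | convert_race_data
-- ===== SOURCE A (Python) =====
-- def is_first_char_integer(string):
--     """
--     Checks if the first character in the provided string is an integer.
--
--     Args:
--         string (str): The string to be evaluated.
--
--     Returns:
--         bool: True if the first character is an integer, False otherwise.
--
--     Notes:
--         - If the input string is empty, this function will return False.
--         - If the first character is not a valid integer, a ValueError will be caught, and False will be returned.
--     """
--     if not string:
--         return False  # Empty strings are not considered integers
--     try:
--         int(string[0])
--         return True
--     except ValueError:
--         return False
--
-- def convert_race_data(data):
--     """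
--     Adds default race data '1-100' if a name does not have associated race data.
--
--     Args:
--         data (list): The list containing names and race data.
--
--     Returns:
--         list: A new list with '1-100' added where race data is missing.
--     """
--     for i, element in enumerate(data):
--         if "reserves" in element.lower():
--             data = data[:i]  # Truncate and return the list up to and including the 'reserves' element
--
--     updated_data = []
--     i = 0
--     while i < len(data):
--         if i + 1 < len(data) and is_first_char_integer(data[i + 1]):
--             # If the next item is race data, add both to the updated data
--             updated_data.extend([data[i], data[i + 1]])
--             i += 2
--         else:
--             # If there is no race data, add the name and '1-100'
--             updated_data.extend([data[i], '1-100'])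
--             i += 1
--
--     left = []
--     right = []
--
--     # Iterate over the list in chunks of four
--     for i in range(0, len(updated_data), 4):
--         # Collect the first and second elements (if they exist) into 'left'
--         if i < len(updated_data):
--             left.append(updated_data[i])
--         if i + 1 < len(updated_data):
--             left.append(updated_data[i + 1])
--         # Collect the third and fourth elements (if they exist) into 'right'
--         if i + 2 < len(updated_data):
--             right.append(updated_data[i + 2])
--         if i + 3 < len(updated_data):
--             right.append(updated_data[i + 3])
--
--     # Combine the 'left' and 'right' lists
--     return left + right
-- ===== SOURCE B (Python) =====
-- def convert_race_data(data):
--     """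
--     Adds default race data '1-100' if a name does not have associated race data,
--     then reshapes into left/right halves, fused into a single pairing pass.
--     """
--     # Keep everything before the first element mentioning 'reserves'.
--     kept = []
--     for element in data:
--         if "reserves" in element.lower():
--             break
--         kept.append(element)
--
--     left = []
--     right = []
--     k = 0  # pair index: even pairs go left, odd pairs go right
--     i = 0
--     while i < len(kept):
--         if i + 1 < len(kept) and kept[i + 1][:1].isdigit():
--             pair = [kept[i], kept[i + 1]]
--             i += 2
--         else:
--             pair = [kept[i], '1-100']
--             i += 1
--         (left if k % 2 == 0 else right).extend(pair)
--         k += 1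
--     return left + right
-- ===== Notes on version B (the rewrite author's own statement) =====
-- stated objective: simpler
-- what changed: B replaces A's repeated slicing fold with a break-at-first-'reserves' scan and fuses the separate chunk-of-four reshape pass into the single pairing loop by routing each pair to left/right by pair-index parity, so the intermediate flat updated_data list and the range(0,len,4) loop disappear.
import Mathlib
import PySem

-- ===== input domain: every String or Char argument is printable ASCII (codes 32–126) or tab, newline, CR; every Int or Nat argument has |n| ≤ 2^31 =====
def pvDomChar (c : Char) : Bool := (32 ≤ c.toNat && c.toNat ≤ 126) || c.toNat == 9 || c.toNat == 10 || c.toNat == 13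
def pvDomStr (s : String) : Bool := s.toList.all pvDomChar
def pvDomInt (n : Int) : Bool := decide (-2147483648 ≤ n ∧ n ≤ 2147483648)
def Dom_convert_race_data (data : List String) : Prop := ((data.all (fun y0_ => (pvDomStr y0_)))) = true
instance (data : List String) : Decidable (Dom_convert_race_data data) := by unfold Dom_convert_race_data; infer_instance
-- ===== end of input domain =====

-- B fuses the chunk-of-four reshape into the single pairing pass (pair parity decides left/right); same return value, different decomposition.

-- ===== PORT A =====
-- helper is_first_char_integer: int(string[0]) succeeds ↔ ofChars? of that one char is some
def is_first_char_integer (s : String) : Bool :=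
  match s.toList with
  | [] => false                      -- 'if not string: return False'
  | c :: _ => (PySem.Int.ofChars? [c]).isSome   -- try: int(string[0]) / except ValueError

-- 'for i, element in enumerate(data): if "reserves" in element.lower(): data = data[:i]'
def pvTruncA (data : List String) : List String :=
  (PySem.List.enumerate data).foldl
    (fun d ie =>
      if PySem.Str.isIn "reserves" (PySem.Str.lower ie.2) then PySem.List.slice d none (some ie.1) else d)
    data

-- the while-loop over index i, as the structural recursion on the remaining suffix data[i:]
def pvPairA : List String → List String
  | [] => []
  | [x] => [x, "1-100"]
  | x :: y :: rest =>
    if is_first_char_integer y then x :: y :: pvPairA rest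
    else x :: "1-100" :: pvPairA (y :: rest)

-- 'for i in range(0, len(updated_data), 4)': each iteration handles up to four elements
def pvChunkA : List String → List String × List String
  | [] => ([], [])
  | [a] => ([a], [])
  | [a, b] => ([a, b], [])
  | [a, b, c] => ([a, b], [c])
  | a :: b :: c :: d :: rest =>
      let lr := pvChunkA rest
      (a :: b :: lr.1, c :: d :: lr.2)

def convert_race_data (data : List String) : List String :=
  let data' := pvTruncA data
  let updated := pvPairA data'
  let lr := pvChunkA updated
  lr.1 ++ lr.2

-- ===== PORT B =====
-- 'for element in data: if "reserves" in element.lower(): break; kept.append(element)'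
def pvKeptB : List String → List String
  | [] => []
  | x :: rest =>
      if PySem.Str.isIn "reserves" (PySem.Str.lower x) then []
      else x :: pvKeptB rest

-- kept[i+1][:1].isdigit(): the first character (if any) is an ASCII digit
def pvHasRaceB (s : String) : Bool :=
  match s.toList with
  | [] => false
  | c :: _ => PySem.Chars.isdigit c

-- the fused while-loop: pair index parity (k % 2 == 0 ↦ even) decides left/right
def pvGoB (even : Bool) : List String → List String × List String
  | [] => ([], [])
  | [x] =>
      if even then ([x, "1-100"], []) else ([], [x, "1-100"])
  | x :: y :: rest =>
      if pvHasRaceB y then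
        let lr := pvGoB (!even) rest
        if even then (x :: y :: lr.1, lr.2) else (lr.1, x :: y :: lr.2)
      else
        let lr := pvGoB (!even) (y :: rest)
        if even then (x :: "1-100" :: lr.1, lr.2) else (lr.1, x :: "1-100" :: lr.2)

def convert_race_data_alt (data : List String) : List String :=
  let kept := pvKeptB data
  let lr := pvGoB true kept
  lr.1 ++ lr.2

-- ===== PRECONDITION & SPEC =====
def Spec_convert_race_data (data : List String) (out : List String) : Prop := out = convert_race_data_alt data
instance (data : List String) (out : List String) : Decidable (Spec_convert_race_data data out) := by unfold Spec_convert_race_data; infer_instance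

-- ===== CLAIM (what is proved, stated in full; the proofs are below) =====
def Claim_equal_convert_race_data : Prop := ∀ (data : List String), Dom_convert_race_data data → Spec_convert_race_data data (convert_race_data data)

-- ===== LEMMAS AND PROOFS =====

-- once the accumulator is no longer than every remaining index, the truncation fold is a no-op
lemma pvTrunc_noop (l : List String) (n : Int) (d : List String) (h : (d.length : Int) ≤ n) :
    (PySem.List.enumerate l n).foldl
      (fun d ie =>
        if PySem.Str.isIn "reserves" (PySem.Str.lower ie.2) then PySem.List.slice d none (some ie.1) else d)
      d = d := by
  induction l generalizing n with
  | nil => simp [PySem.List.enumerate_nil]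
  | cons x rest ih =>
      rw [PySem.List.enumerate_cons]
      simp only [List.foldl_cons]
      split
      · rw [PySem.List.slice_to _ (by omega)]
        rw [List.take_of_length_le (by omega)]
        exact ih (n + 1) (by omega)
      · exact ih (n + 1) (by omega)

-- A's enumerate/slice fold computes the prefix before the first 'reserves' element, i.e. B's kept list
lemma pvTrunc_main (suffix pre : List String) :
    (PySem.List.enumerate suffix (pre.length : Int)).foldl
      (fun d ie =>
        if PySem.Str.isIn "reserves" (PySem.Str.lower ie.2) then PySem.List.slice d none (some ie.1) else d)
      (pre ++ suffix) = pre ++ pvKeptB suffix := by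
  induction suffix generalizing pre with
  | nil => simp [PySem.List.enumerate_nil, pvKeptB]
  | cons x rest ih =>
      rw [PySem.List.enumerate_cons]
      simp only [List.foldl_cons, pvKeptB]
      by_cases hx : PySem.Str.isIn "reserves" (PySem.Str.lower x) = true
      · simp only [hx, if_true]
        rw [PySem.List.slice_to _ (by positivity)]
        simp only [Int.toNat_natCast, List.take_left]
        rw [pvTrunc_noop _ _ _ (by simp)]
        simp
      · simp only [hx, if_false, Bool.false_eq_true]
        have h1 : pre ++ x :: rest = (pre ++ [x]) ++ rest := by simp
        have h2 : (pre.length : Int) + 1 = ((pre ++ [x]).length : Int) := by simp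
        rw [h1, h2, ih (pre ++ [x])]
        simp

lemma pvTrunc_eq (data : List String) : pvTruncA data = pvKeptB data := by
  have := pvTrunc_main data []
  simpa [pvTruncA] using this

-- on domain characters, 'int(c) succeeds' is exactly 'c is an ASCII digit'
lemma pvDigit_eq (c : Char) (h : pvDomChar c = true) :
    (PySem.Int.ofChars? [c]).isSome = PySem.Chars.isdigit c := by
  have hn : c.toNat < 127 := by simp [pvDomChar] at h; omega
  have key : ∀ n : Fin 127,
      (PySem.Int.ofChars? [Char.ofNat n]).isSome = PySem.Chars.isdigit (Char.ofNat n) := by decide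
  have h2 := key ⟨c.toNat, hn⟩
  simpa [Char.ofNat_toNat] using h2

lemma pvHasRace_eq (s : String) (h : pvDomStr s = true) :
    is_first_char_integer s = pvHasRaceB s := by
  unfold is_first_char_integer pvHasRaceB
  cases hs : s.toList with
  | nil => rfl
  | cons c cs =>
      have hc : pvDomChar c = true := by
        have := (List.all_eq_true.mp h) c (by rw [hs]; exact List.mem_cons_self)
        exact this
      exact pvDigit_eq c hc

-- the even/odd-pair splitter: what A's chunk-of-four loop does, one pair at a time
def pvSplit : Bool → List String → List String × List String
  | _, [] => ([], [])
  | b, [x] => if b then ([x], []) else ([], [x])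
  | b, x :: y :: rest =>
      let lr := pvSplit (!b) rest
      if b then (x :: y :: lr.1, lr.2) else (lr.1, x :: y :: lr.2)

-- B's fused loop = splitting A's flat pair list by pair parity
lemma pvGo_eq_split (d : List String) (b : Bool) (h : ∀ s ∈ d, pvDomStr s = true) :
    pvGoB b d = pvSplit b (pvPairA d) := by
  induction d using pvPairA.induct generalizing b with
  | case1 => simp [pvGoB, pvPairA, pvSplit]
  | case2 x =>
      cases b <;> rfl
  | case3 x y rest hy ih =>
      have hyD : pvDomStr y = true := h y (by simp)
      have hB : pvHasRaceB y = true := by rw [← pvHasRace_eq y hyD]; exact hy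
      simp only [pvGoB, pvPairA, hy, hB, if_true, pvSplit]
      rw [ih (!b) (fun s hs => h s (by simp [hs]))]
  | case4 x y rest hy ih =>
      have hyD : pvDomStr y = true := h y (by simp)
      have hB : pvHasRaceB y = false := by
        rw [← pvHasRace_eq y hyD]; exact Bool.not_eq_true _ ▸ eq_false_of_ne_true hy
      simp only [pvGoB, pvPairA, hy, hB, if_false, Bool.false_eq_true, pvSplit]
      rw [ih (!b) (fun s hs => h s (by simp at hs ⊢; tauto))]

-- A's chunk-of-four reshape is the parity splitter started on an even pair
lemma pvChunk_eq_split (u : List String) : pvChunkA u = pvSplit true u := by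
  induction u using pvChunkA.induct with
  | case1 => rfl
  | case2 a => rfl
  | case3 a b => rfl
  | case4 a b c => rfl
  | case5 a b c d rest ih =>
      simp only [pvChunkA, ih, pvSplit]
      rfl

lemma pvKept_sublist (data : List String) : ∀ s ∈ pvKeptB data, s ∈ data := by
  induction data with
  | nil => simp [pvKeptB]
  | cons x rest ih =>
      intro s hs
      simp only [pvKeptB] at hs
      split at hs
      · simp at hs
      · rw [List.mem_cons] at hs
        rcases hs with h | h
        · simp [h]
        · exact List.mem_cons_of_mem _ (ih s h)

-- ===== VERDICT (by name: the statement is the Claim_ definition above) =====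
theorem convert_race_data_spec : Claim_equal_convert_race_data := by
  intro data hdom
  unfold Spec_convert_race_data convert_race_data convert_race_data_alt
  show (pvChunkA (pvPairA (pvTruncA data))).1 ++ (pvChunkA (pvPairA (pvTruncA data))).2 =
      (pvGoB true (pvKeptB data)).1 ++ (pvGoB true (pvKeptB data)).2
  rw [pvTrunc_eq, pvChunk_eq_split]
  rw [pvGo_eq_split]
  intro s hs
  have hmem := pvKept_sublist data s hs
  exact (List.all_eq_true.mp hdom) s hmem
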